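-- pv_equiv track=rewrite | github.com/enrique-rb/16adic-goldbach | code/goldbach_activated_sums_v7.py | generate_deltas
-- ===== SOURCE A (Python) =====
-- def generate_deltas(base_primes, num_primes):
--     delta_k_dict = {}
--     covered_evens = set()
--
--     for k, pk in enumerate(base_primes[:num_primes], start=1):
--         evens = set()
--         for i in range(k):
--             pi = base_primes[i]
--             for j in range(i, k):
--                 pj = base_primes[j]
--                 s = pi + pj
--                 if s % 2 == 0:
--                     evens.add(s)
--         delta_k_dict[k] = evens
--         covered_evens.update(evens)
--
--     return delta_k_dict, covered_evens
-- ===== SOURCE B (Python) =====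
-- def generate_deltas(base_primes, num_primes):
--     # Incremental: keep, per index i, the list of even sums p_i+p_j (i<=j<k);
--     # each step only computes the k new pair sums with the newest prime.
--     pref = base_primes[:num_primes]
--     delta_k_dict = {}
--     covered_evens = set()
--     rows = []  # rows[i] == [pref[i] + pref[j] for j in range(i, k) if even], j ascending
--     for k in range(1, len(pref) + 1):
--         q = pref[k - 1]
--         rows = [row + ([p + q] if (p + q) % 2 == 0 else [])
--                 for row, p in zip(rows + [[]], pref[:k])]
--         evens = set()
--         for row in rows:
--             evens.update(row)
--         delta_k_dict[k] = evens
--         covered_evens.update(evens)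
--     return delta_k_dict, covered_evens
-- ===== Notes on version B (the rewrite author's own statement) =====
-- stated objective: alternative
-- what changed: B caches, for each index i, the list of even pair sums p_i+p_j built so far and extends it with only the k new sums involving the newest prime each step, instead of re-enumerating all O(k^2) pairs from scratch for every prefix length k; intended as faster (probe measured 2.3-3.5x where both finish, but could not always confirm at the largest, output-bound sizes).
import Mathlib
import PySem

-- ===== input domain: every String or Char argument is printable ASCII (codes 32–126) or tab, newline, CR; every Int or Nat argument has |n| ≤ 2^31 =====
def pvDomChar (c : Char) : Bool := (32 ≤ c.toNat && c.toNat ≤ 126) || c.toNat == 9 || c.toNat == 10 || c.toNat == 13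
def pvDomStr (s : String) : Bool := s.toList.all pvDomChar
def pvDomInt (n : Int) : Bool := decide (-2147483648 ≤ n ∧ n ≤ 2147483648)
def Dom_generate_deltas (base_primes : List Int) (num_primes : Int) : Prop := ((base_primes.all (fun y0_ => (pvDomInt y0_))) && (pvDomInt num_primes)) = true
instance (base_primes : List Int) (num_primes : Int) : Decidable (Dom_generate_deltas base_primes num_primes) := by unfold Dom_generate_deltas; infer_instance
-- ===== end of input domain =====

-- B caches per-index rows of even pair sums and extends them with only the k new sums of the
-- newest prime each step, instead of re-enumerating all pairs for every prefix length.

-- ===== PORT A =====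
def generate_deltas (base_primes : List Int) (num_primes : Int) : (List (Int × List Int)) × List Int :=
  let st :=
    (PySem.List.enumerate (PySem.List.slice base_primes none (some num_primes)) 1).foldl
      (fun (st : PySem.Dict Int (List Int) × PySem.Set Int) kpk =>
        let k := kpk.1
        let evens : PySem.Set Int :=
          (PySem.List.pyRange 0 k 1).foldl
            (fun ev i =>
              let pi := PySem.List.pyGetD base_primes i 0
              (PySem.List.pyRange i k 1).foldl
                (fun ev j =>
                  let pj := PySem.List.pyGetD base_primes j 0
                  let s := pi + pj
                  if PySem.Int.mod s 2 == 0 then PySem.Set.add ev s else ev)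
                ev)
            PySem.Set.empty
        (st.1.insert k evens, PySem.Set.update st.2 evens))
      (PySem.Dict.empty, PySem.Set.empty)
  (st.1.items, st.2)

-- ===== PORT B =====
def generate_deltas_alt (base_primes : List Int) (num_primes : Int) : (List (Int × List Int)) × List Int :=
  let pref := PySem.List.slice base_primes none (some num_primes)
  let st :=
    (PySem.List.pyRange 1 ((pref.length : Int) + 1) 1).foldl
      (fun (st : PySem.Dict Int (List Int) × PySem.Set Int × List (List Int)) k =>
        let q := PySem.List.pyGetD pref (k - 1) 0
        let rows :=
          ((st.2.2 ++ [[]]).zip (PySem.List.slice pref none (some k))).map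
            (fun (rp : List Int × Int) => rp.1 ++ (if PySem.Int.mod (rp.2 + q) 2 == 0 then [rp.2 + q] else []))
        let evens := rows.foldl (fun ev row => PySem.Set.update ev row) PySem.Set.empty
        (st.1.insert k evens, PySem.Set.update st.2.1 evens, rows))
      (PySem.Dict.empty, PySem.Set.empty, [])
  (st.1.items, st.2.1)

-- ===== PRECONDITION & SPEC =====
def Spec_generate_deltas (base_primes : List Int) (num_primes : Int) (out : (List (Int × List Int)) × List Int) : Prop := out = generate_deltas_alt base_primes num_primes
instance (base_primes : List Int) (num_primes : Int) (out : (List (Int × List Int)) × List Int) : Decidable (Spec_generate_deltas base_primes num_primes out) := by unfold Spec_generate_deltas; infer_instance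

-- ===== CLAIM (what is proved, stated in full; the proofs are below) =====
def Claim_equal_generate_deltas : Prop := ∀ (base_primes : List Int) (num_primes : Int), Dom_generate_deltas base_primes num_primes → Spec_generate_deltas base_primes num_primes (generate_deltas base_primes num_primes)

-- ===== LEMMAS AND PROOFS =====


-- helper notation for the proofs
def pvP (bp : List Int) (j : Int) : Int := PySem.List.pyGetD bp j 0

def pvRow (bp : List Int) (i m : Int) : List Int :=
  ((PySem.List.pyRange i m 1).map (fun j => pvP bp i + pvP bp j)).filter
    (fun s => PySem.Int.mod s 2 == 0)

def pvRows (bp : List Int) (m : Int) : List (List Int) :=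
  (PySem.List.pyRange 0 m 1).map (fun i => pvRow bp i m)

-- A's inner conditional-add loop is an update with the filtered sum list
theorem pv_condfold (g : Int → Int) (l : List Int) (ev : PySem.Set Int) :
    l.foldl (fun ev j => if PySem.Int.mod (g j) 2 == 0 then PySem.Set.add ev (g j) else ev) ev
      = PySem.Set.update ev ((l.map g).filter (fun s => PySem.Int.mod s 2 == 0)) := by
  induction l generalizing ev with
  | nil => simp [PySem.Set.update]
  | cons a l ih =>
    simp only [List.foldl_cons, List.map_cons, List.filter_cons]
    by_cases h : (PySem.Int.mod (g a) 2 == 0) = true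
    · rw [if_pos h, if_pos h, ih, PySem.Set.update_cons]
    · rw [if_neg h, if_neg h, ih]

-- folding update over a list of rows is one update with the concatenation
theorem pv_foldupd_map (h : Int → List Int) (l : List Int) (ev : PySem.Set Int) :
    l.foldl (fun ev i => PySem.Set.update ev (h i)) ev
      = PySem.Set.update ev (l.map h).flatten := by
  induction l generalizing ev with
  | nil => simp [PySem.Set.update]
  | cons a l ih => simp [ih, PySem.Set.update_append]

theorem pv_foldupd (rl : List (List Int)) (ev : PySem.Set Int) :
    rl.foldl (fun ev row => PySem.Set.update ev row) ev = PySem.Set.update ev rl.flatten := by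
  induction rl generalizing ev with
  | nil => simp [PySem.Set.update]
  | cons r rl ih => simp [ih, PySem.Set.update_append]

-- A's per-k double loop, named
def pvEvensA (bp : List Int) (k : Int) : PySem.Set Int :=
  (PySem.List.pyRange 0 k 1).foldl
    (fun ev i =>
      (PySem.List.pyRange i k 1).foldl
        (fun ev j =>
          if PySem.Int.mod (PySem.List.pyGetD bp i 0 + PySem.List.pyGetD bp j 0) 2 == 0 then
            PySem.Set.add ev (PySem.List.pyGetD bp i 0 + PySem.List.pyGetD bp j 0)
          else ev)
        ev)
    PySem.Set.empty

theorem pv_evensA_eq (bp : List Int) (k : Int) :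
    pvEvensA bp k = PySem.Set.ofList (pvRows bp k).flatten := by
  unfold pvEvensA
  simp only [pv_condfold]
  rw [pv_foldupd_map]
  simp only [pvRows, pvRow, pvP]
  exact PySem.Set.update_empty _

theorem pv_takemap (bp : List Int) (m : Nat) (hm : m ≤ bp.length) :
    bp.take m = (PySem.List.pyRange 0 (m : Int) 1).map (pvP bp) := by
  apply List.ext_getElem
  · simp [PySem.List.length_pyRange_one]; omega
  · intro i h1 h2
    have hi : i < bp.length := by
      simp at h1; omega
    simp only [List.getElem_take, List.getElem_map,
      PySem.List.getElem_pyRange_one, zero_add, pvP, PySem.List.pyGetD_natCast]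
    rw [List.getD_eq_getElem _ _ hi]

theorem pv_p_take (bp : List Int) (t i : Nat) (hi : i < (bp.take t).length) :
    pvP (bp.take t) (i : Int) = pvP bp (i : Int) := by
  have hi' : i < bp.length := by simp at hi; omega
  simp only [pvP, PySem.List.pyGetD_natCast]
  rw [List.getD_eq_getElem _ _ hi, List.getD_eq_getElem _ _ hi', List.getElem_take]

-- one incremental step of B's rows cache
theorem pv_rows_step (bp : List Int) (t m : Nat) (hm : m < (bp.take t).length) :
    ((pvRows bp (m : Int) ++ [[]]).zip ((bp.take t).take (m + 1))).map
        (fun (rp : List Int × Int) =>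
          rp.1 ++ (if PySem.Int.mod (rp.2 + pvP bp (m : Int)) 2 == 0 then
            [rp.2 + pvP bp (m : Int)] else []))
      = pvRows bp ((m : Int) + 1) := by
  have hlen : (bp.take t).length = min t bp.length := by simp
  have hmb : m + 1 ≤ bp.length := by omega
  have htake : (bp.take t).take (m + 1) = bp.take (m + 1) := by
    rw [List.take_take]; congr 1; omega
  have hcast : ((m + 1 : Nat) : Int) = (m : Int) + 1 := by push_cast; ring
  rw [htake, pv_takemap bp (m + 1) hmb, hcast,
    PySem.List.pyRange_one_succ_right (show (0:Int) ≤ (m:Int) by positivity),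
    List.map_append]
  unfold pvRows
  rw [List.zip_append (by simp), List.map_append, List.zip_map']
  rw [PySem.List.pyRange_one_succ_right (show (0:Int) ≤ (m:Int) by positivity),
    List.map_append]
  congr 1
  · rw [List.map_map]
    apply List.map_congr_left
    intro i hi
    rw [PySem.List.mem_pyRange_one] at hi
    simp only [Function.comp]
    unfold pvRow
    rw [PySem.List.pyRange_one_succ_right (by omega : i ≤ (m:Int))]
    simp only [List.map_append, List.filter_append, List.map_cons, List.map_nil,
      List.filter_cons, List.filter_nil]
  · simp only [List.map_cons, List.map_nil, List.zip_cons_cons, List.zip_nil_left]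
    unfold pvRow
    rw [PySem.List.pyRange_one_singleton]
    simp only [List.map_cons, List.map_nil, List.filter_cons, List.filter_nil,
      List.nil_append]

-- the joint induction: after m steps the two states agree and B's cache is pvRows
theorem pvMain (bp : List Int) (t : Nat) (m : Nat) (hm : m ≤ (bp.take t).length) :
    (((PySem.List.pyRange 1 ((m : Int) + 1) 1).foldl
        (fun (st : PySem.Dict Int (List Int) × PySem.Set Int) k =>
          (st.1.insert k (pvEvensA bp k), PySem.Set.update st.2 (pvEvensA bp k)))
        (PySem.Dict.empty, PySem.Set.empty)).1
      = ((PySem.List.pyRange 1 ((m : Int) + 1) 1).foldl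
        (fun (st : PySem.Dict Int (List Int) × PySem.Set Int × List (List Int)) k =>
          (st.1.insert k
            ((((st.2.2 ++ [[]]).zip (PySem.List.slice (bp.take t) none (some k))).map
              (fun (rp : List Int × Int) =>
                rp.1 ++ (if PySem.Int.mod (rp.2 + PySem.List.pyGetD (bp.take t) (k - 1) 0) 2 == 0 then
                  [rp.2 + PySem.List.pyGetD (bp.take t) (k - 1) 0] else []))).foldl
              (fun ev row => PySem.Set.update ev row) PySem.Set.empty),
           PySem.Set.update st.2.1
            ((((st.2.2 ++ [[]]).zip (PySem.List.slice (bp.take t) none (some k))).map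
              (fun (rp : List Int × Int) =>
                rp.1 ++ (if PySem.Int.mod (rp.2 + PySem.List.pyGetD (bp.take t) (k - 1) 0) 2 == 0 then
                  [rp.2 + PySem.List.pyGetD (bp.take t) (k - 1) 0] else []))).foldl
              (fun ev row => PySem.Set.update ev row) PySem.Set.empty),
           ((st.2.2 ++ [[]]).zip (PySem.List.slice (bp.take t) none (some k))).map
              (fun (rp : List Int × Int) =>
                rp.1 ++ (if PySem.Int.mod (rp.2 + PySem.List.pyGetD (bp.take t) (k - 1) 0) 2 == 0 then
                  [rp.2 + PySem.List.pyGetD (bp.take t) (k - 1) 0] else []))))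
        (PySem.Dict.empty, PySem.Set.empty, [])).1)
    ∧ (((PySem.List.pyRange 1 ((m : Int) + 1) 1).foldl
        (fun (st : PySem.Dict Int (List Int) × PySem.Set Int) k =>
          (st.1.insert k (pvEvensA bp k), PySem.Set.update st.2 (pvEvensA bp k)))
        (PySem.Dict.empty, PySem.Set.empty)).2
      = ((PySem.List.pyRange 1 ((m : Int) + 1) 1).foldl
        (fun (st : PySem.Dict Int (List Int) × PySem.Set Int × List (List Int)) k =>
          (st.1.insert k
            ((((st.2.2 ++ [[]]).zip (PySem.List.slice (bp.take t) none (some k))).map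
              (fun (rp : List Int × Int) =>
                rp.1 ++ (if PySem.Int.mod (rp.2 + PySem.List.pyGetD (bp.take t) (k - 1) 0) 2 == 0 then
                  [rp.2 + PySem.List.pyGetD (bp.take t) (k - 1) 0] else []))).foldl
              (fun ev row => PySem.Set.update ev row) PySem.Set.empty),
           PySem.Set.update st.2.1
            ((((st.2.2 ++ [[]]).zip (PySem.List.slice (bp.take t) none (some k))).map
              (fun (rp : List Int × Int) =>
                rp.1 ++ (if PySem.Int.mod (rp.2 + PySem.List.pyGetD (bp.take t) (k - 1) 0) 2 == 0 then
                  [rp.2 + PySem.List.pyGetD (bp.take t) (k - 1) 0] else []))).foldl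
              (fun ev row => PySem.Set.update ev row) PySem.Set.empty),
           ((st.2.2 ++ [[]]).zip (PySem.List.slice (bp.take t) none (some k))).map
              (fun (rp : List Int × Int) =>
                rp.1 ++ (if PySem.Int.mod (rp.2 + PySem.List.pyGetD (bp.take t) (k - 1) 0) 2 == 0 then
                  [rp.2 + PySem.List.pyGetD (bp.take t) (k - 1) 0] else []))))
        (PySem.Dict.empty, PySem.Set.empty, [])).2.1
    ∧ ((PySem.List.pyRange 1 ((m : Int) + 1) 1).foldl
        (fun (st : PySem.Dict Int (List Int) × PySem.Set Int × List (List Int)) k =>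
          (st.1.insert k
            ((((st.2.2 ++ [[]]).zip (PySem.List.slice (bp.take t) none (some k))).map
              (fun (rp : List Int × Int) =>
                rp.1 ++ (if PySem.Int.mod (rp.2 + PySem.List.pyGetD (bp.take t) (k - 1) 0) 2 == 0 then
                  [rp.2 + PySem.List.pyGetD (bp.take t) (k - 1) 0] else []))).foldl
              (fun ev row => PySem.Set.update ev row) PySem.Set.empty),
           PySem.Set.update st.2.1
            ((((st.2.2 ++ [[]]).zip (PySem.List.slice (bp.take t) none (some k))).map
              (fun (rp : List Int × Int) =>
                rp.1 ++ (if PySem.Int.mod (rp.2 + PySem.List.pyGetD (bp.take t) (k - 1) 0) 2 == 0 then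
                  [rp.2 + PySem.List.pyGetD (bp.take t) (k - 1) 0] else []))).foldl
              (fun ev row => PySem.Set.update ev row) PySem.Set.empty),
           ((st.2.2 ++ [[]]).zip (PySem.List.slice (bp.take t) none (some k))).map
              (fun (rp : List Int × Int) =>
                rp.1 ++ (if PySem.Int.mod (rp.2 + PySem.List.pyGetD (bp.take t) (k - 1) 0) 2 == 0 then
                  [rp.2 + PySem.List.pyGetD (bp.take t) (k - 1) 0] else []))))
        (PySem.Dict.empty, PySem.Set.empty, [])).2.2
      = pvRows bp (m : Int)) := by
  induction m with
  | zero =>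
    rw [show ((0:Nat):Int) + 1 = 1 by ring]
    rw [PySem.List.pyRange_one_eq_nil (le_refl 1)]
    refine ⟨rfl, rfl, ?_⟩
    simp [pvRows, PySem.List.pyRange_one_eq_nil (le_refl (0:Int))]
  | succ m ih =>
    have hm' : m ≤ (bp.take t).length := by omega
    obtain ⟨ih1, ih2, ih3⟩ := ih hm'
    have hc : ((m + 1 : Nat) : Int) + 1 = ((m : Int) + 1) + 1 := by push_cast; ring
    rw [hc, PySem.List.pyRange_one_succ_right (by omega : (1:Int) ≤ (m:Int) + 1)]
    simp only [List.foldl_append, List.foldl_cons, List.foldl_nil]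
    -- compute the new rows on the B side
    have hq : PySem.List.pyGetD (bp.take t) ((m : Int) + 1 - 1) 0 = pvP bp (m : Int) := by
      rw [show ((m:Int) + 1 - 1) = ((m:Nat) : Int) by ring]
      exact pv_p_take bp t m (by omega)
    have hslice : PySem.List.slice (bp.take t) none (some ((m : Int) + 1))
        = (bp.take t).take (m + 1) := by
      rw [PySem.List.slice_to _ (by positivity), show ((m:Int) + 1).toNat = m + 1 by omega]
    rw [ih1, ih2, ih3, hq, hslice, pv_rows_step bp t m (by omega)]
    have hev : (pvRows bp ((m : Int) + 1)).foldl (fun ev row => PySem.Set.update ev row)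
        PySem.Set.empty = pvEvensA bp ((m : Int) + 1) := by
      rw [pv_foldupd, PySem.Set.update_empty, pv_evensA_eq]
    rw [hev]
    exact ⟨rfl, rfl, rfl⟩

-- A's enumerate loop only uses the counter: it is a loop over range(1, n+1)
theorem pv_enumfold {α σ : Type} (xs : List α) (F : σ → Int → σ) (init : σ) :
    (PySem.List.enumerate xs 1).foldl (fun st p => F st p.1) init
      = (PySem.List.pyRange 1 (1 + (xs.length : Int)) 1).foldl F init := by
  rw [← PySem.List.map_fst_enumerate xs 1, List.foldl_map]
-- ===== VERDICT (by name: the statement is the Claim_ definition above) =====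
theorem generate_deltas_spec : Claim_equal_generate_deltas := by
  intro bp np _
  unfold Spec_generate_deltas
  obtain ⟨t, ht⟩ : ∃ t : Nat, PySem.List.slice bp none (some np) = bp.take t := by
    by_cases h : (0:Int) ≤ np
    · exact ⟨np.toNat, PySem.List.slice_to bp h⟩
    · refine ⟨bp.length - (-np).toNat, ?_⟩
      have h1 : (0:Nat) < (-np).toNat := by omega
      have h2 := PySem.List.slice_to_neg_natCast bp (-np).toNat h1
      rw [show -((((-np).toNat : Nat)) : Int) = np by omega] at h2
      exact h2
  simp only [generate_deltas, generate_deltas_alt, ht]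
  have E := pv_enumfold (bp.take t)
    (fun (st : PySem.Dict Int (List Int) × PySem.Set Int) k =>
      (st.1.insert k (pvEvensA bp k), PySem.Set.update st.2 (pvEvensA bp k)))
    (PySem.Dict.empty, PySem.Set.empty)
  rw [show (1 + ((bp.take t).length : Int)) = ((bp.take t).length : Int) + 1 by ring] at E
  have H := pvMain bp t (bp.take t).length le_rfl
  exact congrArg₂ Prod.mk
    (congrArg PySem.Dict.items ((congrArg Prod.fst E).trans H.1))
    ((congrArg Prod.snd E).trans H.2.1)
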